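-- pv_equiv track=rewrite | github.com/BruhLmao20/BlockGameAI | game-sim/gamerules.py | _clear_completed_lines
-- ===== SOURCE A (Python) =====
-- from typing import List, Sequence, Tuple
--
-- def _clear_completed_lines(board: List[List[int]]) -> int:
--     """Remove filled rows and columns from ``board`` and return how many.
--
--     The board is modified in place.  The return value is the total number of
--     rows and columns cleared.
--     """
--
--     rows = len(board)
--     cols = len(board[0]) if rows else 0
--
--     rows_to_clear = [r for r in range(rows) if all(board[r][c] for c in range(cols))]
--     cols_to_clear = [c for c in range(cols) if all(board[r][c] for r in range(rows))]
--
--     for r in rows_to_clear: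
--         for c in range(cols):
--             board[r][c] = 0
--
--     for c in cols_to_clear:
--         for r in range(rows):
--             board[r][c] = 0
--
--     return len(rows_to_clear) + len(cols_to_clear)
-- ===== SOURCE B (Python) =====
-- def _clear_completed_lines(board):
--     """Single pass: count truthy cells per row and keep running column counters,
--     then clear the full lines.  Board is modified in place like the original."""
--     rows = len(board)
--     cols = len(board[0]) if board else 0
--
--     col_filled = [0] * cols
--     full_rows = []
--     for r, row in enumerate(board):
--         col_filled = [cnt + (1 if x else 0) for cnt, x in zip(col_filled, row)]
--         if sum(1 for x in row[:cols] if x) == cols: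
--             full_rows.append(r)
--     full_cols = [c for c in range(cols) if col_filled[c] == rows]
--
--     for r in full_rows:
--         for c in range(cols):
--             board[r][c] = 0
--     for c in full_cols:
--         for r in range(rows):
--             board[r][c] = 0
--
--     return len(full_rows) + len(full_cols)
-- ===== Notes on version B (the rewrite author's own statement) =====
-- stated objective: alternative
-- what changed: Replaces A's two separate index-based scans (row scan with all(), then a transposed column scan with all()) by a single enumerate pass over the rows that counts truthy cells per row and maintains running column counters, deciding fullness by count == dimension.
-- outside the precondition, e.g. on _clear_completed_lines([[1, 0], [0]]): A returns 0, B raises IndexError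
import Mathlib
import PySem

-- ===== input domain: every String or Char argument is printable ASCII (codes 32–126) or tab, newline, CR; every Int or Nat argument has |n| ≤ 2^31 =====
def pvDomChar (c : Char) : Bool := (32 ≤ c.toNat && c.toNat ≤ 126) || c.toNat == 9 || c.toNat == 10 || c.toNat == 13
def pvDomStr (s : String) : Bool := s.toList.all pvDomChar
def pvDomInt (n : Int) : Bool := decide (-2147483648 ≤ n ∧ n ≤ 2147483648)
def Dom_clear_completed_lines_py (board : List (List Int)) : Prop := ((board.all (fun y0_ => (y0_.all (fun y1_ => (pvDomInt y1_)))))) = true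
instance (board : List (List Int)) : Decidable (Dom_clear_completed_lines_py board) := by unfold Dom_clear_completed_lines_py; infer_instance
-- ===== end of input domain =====

-- ===== PORT A =====
-- Port of A's return value; both Pythons also zero the cleared lines in the
-- argument in place — the equivalence proved here is about the RETURN value only.
def clear_completed_lines_py (board : List (List Int)) : Int :=
  let rows := board.length
  let cols := if rows ≠ 0 then (board.headD []).length else 0
  let rowsToClear := (PySem.List.pyRange 0 (rows : Int) 1).filter (fun r =>
      (PySem.List.pyRange 0 (cols : Int) 1).all (fun c =>
        !(PySem.List.pyGetD (PySem.List.pyGetD board r []) c 0 == 0)))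
  let colsToClear := (PySem.List.pyRange 0 (cols : Int) 1).filter (fun c =>
      (PySem.List.pyRange 0 (rows : Int) 1).all (fun r =>
        !(PySem.List.pyGetD (PySem.List.pyGetD board r []) c 0 == 0)))
  (rowsToClear.length : Int) + (colsToClear.length : Int)

-- ===== PORT B =====
def clear_completed_lines_py_alt (board : List (List Int)) : Int :=
  let rows := board.length
  let cols := if rows ≠ 0 then (board.headD []).length else 0
  let st := (PySem.List.enumerate board).foldl
      (fun (st : List Nat × List Int) rp =>
        ((st.1.zip rp.2).map (fun p => p.1 + if p.2 != 0 then 1 else 0),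
         if (rp.2.take cols).countP (· != 0) = cols then st.2 ++ [rp.1] else st.2))
      (List.replicate cols 0, ([] : List Int))
  let fullCols := (PySem.List.pyRange 0 (cols : Int) 1).filter
      (fun c => PySem.List.pyGetD st.1 c 0 == rows)
  (st.2.length : Int) + (fullCols.length : Int)

-- ===== PRECONDITION & SPEC =====
-- Pre_ requires every row to be at least as long as the first (which fixes the
-- column count): on boards with a shorter row one or both Pythons raise
-- IndexError (or A returns only by accident of all()'s short-circuiting).
def Pre_clear_completed_lines_py (board : List (List Int)) : Prop :=
  ∀ row ∈ board, (board.headD []).length ≤ row.length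
instance (board : List (List Int)) : Decidable (Pre_clear_completed_lines_py board) := by
  unfold Pre_clear_completed_lines_py; infer_instance
def pvWitness_clear_completed_lines_py : List (List Int) := [[1, 2], [0, 3]]

def Spec_clear_completed_lines_py (board : List (List Int)) (out : Int) : Prop := out = clear_completed_lines_py_alt board
instance (board : List (List Int)) (out : Int) : Decidable (Spec_clear_completed_lines_py board out) := by unfold Spec_clear_completed_lines_py; infer_instance

-- ===== CLAIM (what is proved, stated in full; the proofs are below) =====
def Claim_equal_clear_completed_lines_py : Prop := ∀ (board : List (List Int)), Dom_clear_completed_lines_py board → Pre_clear_completed_lines_py board → Spec_clear_completed_lines_py board (clear_completed_lines_py board)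

-- ===== LEMMAS AND PROOFS =====

-- 'all(...)' over an index range is 'all' over the list itself
lemma all_pyRange_pyGetD {α : Type} (xs : List α) (d : α) (Q : α → Bool) :
    (PySem.List.pyRange 0 (xs.length : Int) 1).all (fun r => Q (PySem.List.pyGetD xs r d))
      = xs.all Q := by
  conv_rhs => rw [← PySem.List.map_pyGetD_pyRange_zero' xs d]
  rw [List.all_map]
  rfl

-- 'countP' over an index range is 'countP' over the list itself
lemma countP_pyRange_pyGetD {α : Type} (xs : List α) (d : α) (Q : α → Bool) :
    (PySem.List.pyRange 0 (xs.length : Int) 1).countP (fun r => Q (PySem.List.pyGetD xs r d))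
      = xs.countP Q := by
  conv_rhs => rw [← PySem.List.map_pyGetD_pyRange_zero' xs d]
  rw [List.countP_map]
  rfl

-- indexing the first k cells of a list is taking its k-prefix
lemma map_pyRange_getD {α : Type} (xs : List α) (d : α) (k : Nat) (hk : k ≤ xs.length) :
    (PySem.List.pyRange 0 (k : Int) 1).map (fun j => PySem.List.pyGetD xs j d)
      = xs.take k := by
  rw [PySem.List.pyRange_one, List.map_map]
  have hkk : ((k : Int) - 0).toNat = k := by omega
  rw [hkk]
  apply List.ext_getElem
  · simp [hk]
  · intro i h1 h2
    simp only [List.getElem_map, List.getElem_range, Function.comp_apply, Int.zero_add,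
      PySem.List.pyGetD_natCast, List.getElem_take]
    rw [List.getD_eq_getElem]

-- a row is scanned full by A iff the truthy-cell count of its cols-prefix is cols
lemma rowfull_iff (row : List Int) (w : Nat) (hw : w ≤ row.length) :
    ((PySem.List.pyRange 0 (w : Int) 1).all (fun c => !(PySem.List.pyGetD row c 0 == 0)))
      = decide ((row.take w).countP (· != 0) = w) := by
  have hmap := map_pyRange_getD row 0 w hw
  have hall : ((PySem.List.pyRange 0 (w : Int) 1).all
      (fun c => !(PySem.List.pyGetD row c 0 == 0)))
        = (row.take w).all (fun x => !(x == 0)) := by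
    rw [← hmap, List.all_map]; rfl
  rw [hall, Bool.eq_iff_iff]
  simp only [bne, List.all_eq_true, decide_eq_true_eq]
  have hl : (row.take w).length = w := by simp [hw]
  rw [← List.countP_eq_length, hl]

-- the first component of B's paired enumerate fold is the plain column-counter fold
lemma st_fst (w : Nat) (xs : List (List Int)) (s : Int) (cf : List Nat) (fr : List Int) :
    ((PySem.List.enumerate xs s).foldl
        (fun (st : List Nat × List Int) rp =>
          ((st.1.zip rp.2).map (fun p => p.1 + if p.2 != 0 then 1 else 0),
           if (rp.2.take w).countP (· != 0) = w then st.2 ++ [rp.1] else st.2))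
        (cf, fr)).1
      = xs.foldl (fun cf row =>
          (cf.zip row).map (fun p => p.1 + if p.2 != 0 then 1 else 0)) cf := by
  induction xs generalizing s cf fr with
  | nil => rfl
  | cons hd tl ih =>
      simp only [PySem.List.enumerate_cons, List.foldl_cons]
      exact ih _ _ _

-- the second component collects the indices of the rows whose truthy count is w
lemma st_snd_len (w : Nat) (xs : List (List Int)) (s : Int) (cf : List Nat) (fr : List Int) :
    ((PySem.List.enumerate xs s).foldl
        (fun (st : List Nat × List Int) rp =>
          ((st.1.zip rp.2).map (fun p => p.1 + if p.2 != 0 then 1 else 0),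
           if (rp.2.take w).countP (· != 0) = w then st.2 ++ [rp.1] else st.2))
        (cf, fr)).2.length
      = fr.length + xs.countP (fun row => decide ((row.take w).countP (· != 0) = w)) := by
  induction xs generalizing s cf fr with
  | nil => simp [PySem.List.enumerate]
  | cons hd tl ih =>
      simp only [PySem.List.enumerate_cons, List.foldl_cons, List.countP_cons]
      rw [ih]
      by_cases h : (hd.take w).countP (· != 0) = w <;> (simp [h]; try omega)

-- the running column counters of B count the truthy cells of each column
lemma colfold (board : List (List Int)) (w : Nat)
    (hrow : ∀ row ∈ board, w ≤ row.length) (cf : List Nat) (hcf : cf.length = w)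
    (k : Nat) (hk : k < w) :
    (board.foldl (fun cf row =>
        (cf.zip row).map (fun p => p.1 + if p.2 != 0 then 1 else 0)) cf).getD k 0
      = cf.getD k 0 + board.countP (fun row => row.getD k 0 != 0) := by
  induction board generalizing cf with
  | nil => simp
  | cons hd tl ih =>
      have hhd : w ≤ hd.length := hrow hd (List.mem_cons_self ..)
      have hlen : ((cf.zip hd).map
          (fun p => p.1 + if p.2 != 0 then 1 else 0)).length = w := by
        simp [hcf]; omega
      rw [List.foldl_cons, List.countP_cons,
        ih (fun row hr => hrow row (List.mem_cons_of_mem _ hr)) _ hlen]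
      have hk' : k < ((cf.zip hd).map
          (fun p => p.1 + if p.2 != 0 then 1 else 0)).length := by omega
      rw [List.getD_eq_getElem _ _ hk', List.getElem_map, List.getElem_zip]
      have hkcf : k < cf.length := by omega
      have hkhd : k < hd.length := by omega
      rw [List.getD_eq_getElem _ _ hkcf, List.getD_eq_getElem _ _ hkhd]
      by_cases h : hd[k] ≠ 0 <;> (simp [h]; try omega)

-- ===== VERDICT (by name: the statement is the Claim_ definition above) =====
theorem clear_completed_lines_py_spec : Claim_equal_clear_completed_lines_py := by
  intro board _ hpre
  unfold Spec_clear_completed_lines_py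
  cases board with
  | nil => rfl
  | cons hd tl =>
      have hpre' : ∀ row ∈ hd :: tl, hd.length ≤ row.length := by
        intro row hr; simpa using hpre row hr
      have hne : tl.length + 1 ≠ 0 := by omega
      simp only [clear_completed_lines_py, clear_completed_lines_py_alt,
        List.length_cons, List.headD_cons, ne_eq, hne, not_false_eq_true, if_true]
      rw [st_fst, st_snd_len]
      simp only [← List.length_cons (a := hd) (as := tl)]
      congr 1
      · -- row count
        rw [← List.countP_eq_length_filter, countP_pyRange_pyGetD (hd :: tl) []
          (fun row => (PySem.List.pyRange 0 (hd.length : Int) 1).all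
            (fun c => !(PySem.List.pyGetD row c 0 == 0)))]
        rw [List.countP_congr (fun row hr => by rw [rowfull_iff row hd.length (hpre' row hr)])]
        simp
      · -- column filters are pointwise equal
        congr 2
        refine List.filter_congr (fun c hc => ?_)
        rw [PySem.List.mem_pyRange_one] at hc
        obtain ⟨hc0, hcw⟩ := hc
        have hk : c = ((c.toNat : Nat) : Int) := (Int.toNat_of_nonneg hc0).symm
        rw [hk] at hcw ⊢
        have hkw : c.toNat < hd.length := by exact_mod_cast hcw
        rw [all_pyRange_pyGetD (hd :: tl) []
          (fun row => !(PySem.List.pyGetD row ((c.toNat : Nat) : Int) 0 == 0))]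
        rw [PySem.List.pyGetD_natCast]
        rw [colfold (hd :: tl) hd.length hpre' (List.replicate hd.length 0)
          (by simp) c.toNat hkw]
        rw [Bool.eq_iff_iff]
        simp only [PySem.List.pyGetD_natCast, List.all_eq_true, beq_iff_eq, bne]
        have hrep : (List.replicate hd.length (0 : Nat)).getD c.toNat 0 = 0 := by simp
        rw [hrep, Nat.zero_add, List.countP_eq_length]
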